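-- pv_equiv track=rewrite | github.com/gkdis6/algorithm | 프로그래머스/1/142086. 가장 가까운 같은 글자/가장 가까운 같은 글자.py | solution
-- ===== SOURCE A (Python) =====
-- def solution(s):
--     answer = [0]*len(s)
--
--     for i in range(len(s)):
--         for j in range(i+1):
--             if s[i] == s[j] and i != j:
--                 answer[i] = i-j
--                 continue
--         if answer[i] == 0:
--             answer[i] = -1
--     return answer
-- ===== SOURCE B (Python) =====
-- def solution(s):
--     last = {}
--     answer = []
--     for i, c in enumerate(s):
--         answer.append(i - last[c] if c in last else -1)
--         last[c] = i
--     return answer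
-- ===== Notes on version B (the rewrite author's own statement) =====
-- stated objective: faster
-- what changed: Replaced the quadratic rescan of all earlier positions for each index by a single left-to-right pass that keeps each character's last seen index in a dict.
import Mathlib
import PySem

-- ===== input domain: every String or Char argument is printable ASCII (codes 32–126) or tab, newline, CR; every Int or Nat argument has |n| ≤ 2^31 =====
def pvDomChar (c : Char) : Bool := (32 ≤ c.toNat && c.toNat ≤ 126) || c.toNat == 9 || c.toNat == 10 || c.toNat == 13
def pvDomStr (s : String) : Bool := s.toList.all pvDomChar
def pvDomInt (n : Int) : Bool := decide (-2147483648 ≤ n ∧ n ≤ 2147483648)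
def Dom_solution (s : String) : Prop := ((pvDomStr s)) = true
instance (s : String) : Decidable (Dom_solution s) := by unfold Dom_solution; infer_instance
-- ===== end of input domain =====

-- B replaces A's quadratic rescan of all earlier positions by a single pass with a dict of last indices.

-- ===== PORT A =====
-- literal port of A: answer = [0]*len(s), nested index loops; every index used is in
-- range, so s[i]/answer[i] are pyGetD and 'answer[i] = v' is pySetD (exact here).
def solution (s : String) : List Int :=
  let cs := s.toList
  let n : Int := (cs.length : Int)
  let answer0 : List Int := List.replicate cs.length 0
  (PySem.List.pyRange 0 n 1).foldl (fun answer i =>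
    let answer := (PySem.List.pyRange 0 (i+1) 1).foldl (fun ans j =>
      if PySem.List.pyGetD cs i ' ' = PySem.List.pyGetD cs j ' ' ∧ i ≠ j then
        PySem.List.pySetD ans i (i - j)
      else ans) answer
    if PySem.List.pyGetD answer i 0 = 0 then PySem.List.pySetD answer i (-1) else answer)
    answer0

-- ===== PORT B =====
def solution_alt (s : String) : List Int :=
  ((PySem.List.enumerate s.toList 0).foldl
    (fun (st : List Int × PySem.Dict Char Int) p =>
      let v : Int := if PySem.Dict.contains st.2 p.2 then p.1 - PySem.Dict.getD st.2 p.2 0 else -1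
      (st.1 ++ [v], PySem.Dict.insert st.2 p.2 p.1))
    ([], PySem.Dict.empty)).1

-- ===== PRECONDITION & SPEC =====
def Spec_solution (s : String) (out : List Int) : Prop := out = solution_alt s
instance (s : String) (out : List Int) : Decidable (Spec_solution s out) := by unfold Spec_solution; infer_instance

-- ===== CLAIM (what is proved, stated in full; the proofs are below) =====
def Claim_equal_solution : Prop := ∀ (s : String), Dom_solution s → Spec_solution s (solution s)

-- ===== LEMMAS AND PROOFS =====

-- index of the last occurrence of c in cs, if any (the common characterisation)
def lastM (c : Char) : List Char → Option Nat
  | [] => none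
  | x :: xs => match lastM c xs with
    | some j => some (j + 1)
    | none => if x = c then some 0 else none

theorem lastM_append_singleton (c x : Char) (cs : List Char) :
    lastM c (cs ++ [x]) = if x = c then some cs.length else lastM c cs := by
  induction cs with
  | nil => simp [lastM]
  | cons y ys ih =>
    simp only [List.cons_append, lastM, ih]
    by_cases h : x = c <;> simp [h]

theorem lastM_lt (c : Char) (cs : List Char) (j : Nat) (h : lastM c cs = some j) :
    j < cs.length := by
  induction cs generalizing j with
  | nil => simp [lastM] at h
  | cons y ys ih =>
    simp only [lastM] at h
    cases hy : lastM c ys with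
    | some j' =>
      rw [hy] at h; simp at h
      have := ih j' hy
      simp only [List.length_cons]; omega
    | none =>
      rw [hy] at h
      by_cases hc : y = c
      · simp [hc] at h; simp only [List.length_cons]; omega
      · simp [hc] at h

-- the result value at index i: distance to the nearest earlier equal char, else -1
def fval (cs : List Char) (i : Nat) : Int :=
  match lastM (cs.getD i ' ') (cs.take i) with
  | some j => (i : Int) - (j : Int)
  | none => -1

theorem fval_append (cs : List Char) (x : Char) (i : Nat) (h : i < cs.length) :
    fval (cs ++ [x]) i = fval cs i := by
  unfold fval
  rw [List.take_append_of_le_length (by omega)]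
  congr 2
  simp [List.getD, List.getElem?_append_left h]

theorem B_fold_gen (cs : List Char) :
    (((PySem.List.enumerate cs 0).foldl
      (fun (st : List Int × PySem.Dict Char Int) p =>
        let v : Int := if PySem.Dict.contains st.2 p.2 then p.1 - PySem.Dict.getD st.2 p.2 0 else -1
        (st.1 ++ [v], PySem.Dict.insert st.2 p.2 p.1))
      ([], PySem.Dict.empty)).1 = (List.range cs.length).map (fval cs)) ∧
    (∀ c, PySem.Dict.get? (((PySem.List.enumerate cs 0).foldl
      (fun (st : List Int × PySem.Dict Char Int) p =>
        let v : Int := if PySem.Dict.contains st.2 p.2 then p.1 - PySem.Dict.getD st.2 p.2 0 else -1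
        (st.1 ++ [v], PySem.Dict.insert st.2 p.2 p.1))
      ([], PySem.Dict.empty)).2) c = (lastM c cs).map (fun j => (j : Int))) := by
  induction cs using List.reverseRecOn with
  | nil => constructor <;> simp [PySem.List.enumerate, lastM]
  | append_singleton cs x ih =>
    obtain ⟨ih1, ih2⟩ := ih
    rw [PySem.List.enumerate_append, List.foldl_append]
    set R := ((PySem.List.enumerate cs 0).foldl
      (fun (st : List Int × PySem.Dict Char Int) p =>
        let v : Int := if PySem.Dict.contains st.2 p.2 then p.1 - PySem.Dict.getD st.2 p.2 0 else -1
        (st.1 ++ [v], PySem.Dict.insert st.2 p.2 p.1))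
      ([], PySem.Dict.empty)) with hRdef
    constructor
    · simp only [PySem.List.enumerate, List.foldl_cons, List.foldl_nil]
      rw [ih1, List.length_append, List.length_singleton, List.range_succ, List.map_append]
      congr 1
      · exact (List.map_congr_left fun i hi => (fval_append cs x i (List.mem_range.mp hi)).symm)
      · simp only [List.map_singleton]
        congr 1
        have hc : PySem.Dict.contains R.2 x = (lastM x cs).isSome := by
          rw [PySem.Dict.contains_eq_isSome_get?, ih2 x]
          cases lastM x cs <;> simp
        have hg := ih2 x
        unfold fval
        rw [List.getD, List.getElem?_append_right (by omega)]
        simp only [Nat.sub_self, List.getElem?_cons_zero, Option.getD_some,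
          List.take_append_of_le_length (le_refl _), List.take_length]
        rw [hc, PySem.Dict.getD_eq_get?_getD, hg]
        cases lastM x cs <;> simp
    · intro c
      simp only [PySem.List.enumerate, List.foldl_cons, List.foldl_nil]
      rw [lastM_append_singleton]
      rw [PySem.Dict.get?_insert]
      by_cases h : c = x
      · subst h
        simp
      · rw [if_neg h, ih2 c, if_neg (fun hh => h hh.symm)]

-- one inner pass of A over j ∈ range k writes into index m exactly the last match
theorem A_inner (cs : List Char) (m : Nat) (hm : m < cs.length) (k : Nat) (hk : k ≤ m)
    (ans : List Int) :
    ((List.range k).map (fun j : Nat => (j : Int))).foldl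
      (fun ans j =>
        if PySem.List.pyGetD cs (m : Int) ' ' = PySem.List.pyGetD cs j ' ' ∧ (m : Int) ≠ j then
          PySem.List.pySetD ans (m : Int) ((m : Int) - j)
        else ans) ans =
    (match lastM (cs.getD m ' ') (cs.take k) with
    | some j => ans.set m ((m : Int) - (j : Int))
    | none => ans) := by
  induction k generalizing ans with
  | zero => simp [lastM]
  | succ k ih =>
    rw [List.range_succ, List.map_append, List.foldl_append]
    rw [ih (by omega)]
    have htake : cs.take (k + 1) = cs.take k ++ [cs.getD k ' '] := by
      rw [List.take_add_one]
      congr 1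
      have h : cs[k]? = some cs[k] := List.getElem?_eq_getElem (by omega)
      simp [h, List.getD]
    rw [htake, lastM_append_singleton]
    simp only [List.map_singleton, List.foldl_cons, List.foldl_nil,
      PySem.List.pyGetD_natCast, PySem.List.pySetD_natCast]
    have hne : (m : Int) ≠ (k : Int) := by
      simp only [ne_eq, Int.natCast_inj]; omega
    by_cases hc : cs.getD k ' ' = cs.getD m ' '
    · rw [if_pos ⟨hc.symm, hne⟩, if_pos hc]
      have hlen : (cs.take k).length = k := by
        simp only [List.length_take]
        omega
      cases lastM (cs.getD m ' ') (cs.take k) with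
      | some j => rw [List.set_set, hlen]
      | none => rw [hlen]
    · rw [if_neg (fun h => hc h.1.symm), if_neg hc]

theorem set_map_step (cs : List Char) (n mm : Nat) (_hm : mm < n) :
    (((List.range n).map (fun i => if i < mm then fval cs i else 0)).set mm (fval cs mm))
    = (List.range n).map (fun i => if i < mm + 1 then fval cs i else 0) := by
  apply List.ext_getElem
  · simp
  · intro i h1 h2
    simp only [List.length_set, List.length_map, List.length_range] at h1
    rw [List.getElem_set]
    simp only [List.getElem_map, List.getElem_range]
    by_cases e : mm = i
    · subst e; simp
    · rw [if_neg e]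
      by_cases b : i < mm
      · rw [if_pos b, if_pos (by omega)]
      · rw [if_neg b, if_neg (by omega)]

theorem A_outer (cs : List Char) (mm : Nat) (hmm : mm ≤ cs.length) :
    ((List.range mm).map (fun i : Nat => (i : Int))).foldl
      (fun answer i =>
        let answer := (PySem.List.pyRange 0 (i+1) 1).foldl (fun ans j =>
          if PySem.List.pyGetD cs i ' ' = PySem.List.pyGetD cs j ' ' ∧ i ≠ j then
            PySem.List.pySetD ans i (i - j)
          else ans) answer
        if PySem.List.pyGetD answer i 0 = 0 then PySem.List.pySetD answer i (-1) else answer)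
      (List.replicate cs.length 0) =
    (List.range cs.length).map (fun i => if i < mm then fval cs i else 0) := by
  induction mm with
  | zero =>
    simp
  | succ mm ih =>
    rw [List.range_succ, List.map_append, List.foldl_append, ih (by omega)]
    simp only [List.map_singleton, List.foldl_cons, List.foldl_nil]
    have hrange : PySem.List.pyRange 0 ((mm : Int) + 1) 1
        = ((List.range mm).map (fun j : Nat => (j : Int))) ++ [(mm : Int)] := by
      rw [PySem.List.pyRange_one_succ_right (by positivity), PySem.List.pyRange_zero_natCast]
    rw [hrange, List.foldl_append]
    set prev : List Int := (List.range cs.length).map (fun i => if i < mm then fval cs i else 0) with hprev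
    rw [A_inner cs mm (by omega) mm le_rfl prev]
    simp only [List.foldl_cons, List.foldl_nil]
    rw [if_neg (show ¬(True ∧ (mm : Int) ≠ (mm : Int)) from fun h => h.2 rfl)]
    cases hl : lastM (cs.getD mm ' ') (cs.take mm) with
    | some j =>
      have hj : j < mm := by
        have := lastM_lt _ _ _ hl
        rw [List.length_take] at this
        omega
      have hlen : prev.length = cs.length := by simp [hprev]
      have hmatch : (match some j with
          | some j => prev.set mm ((mm : Int) - (j : Int))
          | none => prev) = prev.set mm ((mm : Int) - (j : Int)) := rfl
      rw [hmatch]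
      have hget : PySem.List.pyGetD (prev.set mm ((mm : Int) - (j : Int))) (mm : Int) 0
          = (mm : Int) - (j : Int) := by
        rw [PySem.List.pyGetD_natCast, List.getD_eq_getElem?_getD,
          List.getElem?_set_self (by omega)]
        rfl
      rw [hget, if_neg (by omega)]
      have hfv : fval cs mm = (mm : Int) - (j : Int) := by unfold fval; rw [hl]
      rw [← hfv, hprev, set_map_step cs cs.length mm (by omega)]
    | none =>
      have hmatch : (match (none : Option Nat) with
          | some j => prev.set mm ((mm : Int) - (j : Int))
          | none => prev) = prev := rfl
      rw [hmatch]
      have hget : PySem.List.pyGetD prev (mm : Int) 0 = 0 := by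
        rw [PySem.List.pyGetD_natCast, hprev]
        rw [PySem.List.getD_map_range _ cs.length mm 0 (by omega)]
        simp
      rw [hget, if_pos rfl, PySem.List.pySetD_natCast]
      have hfv : fval cs mm = -1 := by unfold fval; rw [hl]
      rw [show ((-1 : Int) = fval cs mm) from hfv.symm, hprev,
        set_map_step cs cs.length mm (by omega)]

theorem solution_eq (s : String) :
    solution s = (List.range s.toList.length).map (fval s.toList) := by
  simp only [solution]
  rw [PySem.List.pyRange_zero_natCast]
  rw [A_outer s.toList s.toList.length le_rfl]
  exact List.map_congr_left fun i hi => by rw [if_pos (List.mem_range.mp hi)]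

-- ===== VERDICT (by name: the statement is the Claim_ definition above) =====
theorem solution_spec : Claim_equal_solution := by
  intro s _
  unfold Spec_solution solution_alt
  rw [(B_fold_gen s.toList).1, solution_eq]
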